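-- pv_equiv track=rewrite | github.com/lostkingdom4/tritonbench | .ci/test_infra/oss_ci_benchmark_v3.py | get_dtype_from_op
-- ===== SOURCE A (Python) =====
-- from typing import Any, Dict, List, Optional, Tuple
--
-- DTYPE_PREFIXES = ["fp16", "fp32", "bf16", "int8", "int4", "fp8"]
--
-- BUILTIN_DTYPE_PREFIXES = ["fp8", "int8", "int4"]
--
-- def get_dtype_from_op(op: str) -> Tuple[str, str]:
--     for dtype_prefix in DTYPE_PREFIXES:
--         if op.startswith(f"{dtype_prefix}_"):
--             if dtype_prefix in BUILTIN_DTYPE_PREFIXES: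
--                 return dtype_prefix, op
--             else:
--                 return dtype_prefix, op[len(dtype_prefix) + 1 :]
--     return "unknown", op
-- ===== SOURCE B (Python) =====
-- from typing import Tuple
--
-- DTYPE_PREFIXES = ["fp16", "fp32", "bf16", "int8", "int4", "fp8"]
--
-- BUILTIN_DTYPE_PREFIXES = ["fp8", "int8", "int4"]
--
-- def get_dtype_from_op(op: str) -> Tuple[str, str]:
--     # one partition at the first '_' instead of scanning prefixes with startswith
--     head, sep, tail = op.partition("_")
--     if sep and head in DTYPE_PREFIXES:
--         return (head, op) if head in BUILTIN_DTYPE_PREFIXES else (head, tail)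
--     return ("unknown", op)
-- ===== Notes on version B (the rewrite author's own statement) =====
-- stated objective: simpler
-- what changed: Replaces the loop of six startswith scans (plus a slice) with a single partition at the first underscore followed by a membership test on the head.
import Mathlib
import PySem

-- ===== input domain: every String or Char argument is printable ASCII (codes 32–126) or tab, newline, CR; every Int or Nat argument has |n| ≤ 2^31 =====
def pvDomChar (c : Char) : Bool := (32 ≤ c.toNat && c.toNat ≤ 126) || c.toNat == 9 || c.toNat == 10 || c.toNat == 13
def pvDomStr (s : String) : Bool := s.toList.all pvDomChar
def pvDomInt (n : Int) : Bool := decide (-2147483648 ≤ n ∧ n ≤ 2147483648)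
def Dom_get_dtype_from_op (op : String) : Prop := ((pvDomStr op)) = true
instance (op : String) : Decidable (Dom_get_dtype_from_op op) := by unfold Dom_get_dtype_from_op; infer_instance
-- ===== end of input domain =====

-- B replaces A's loop of six startswith scans (plus a slice) by one partition at the first '_' and membership tests on the head (simpler; same asymptotic cost).


-- ===== PORT A =====
def DTYPE_PREFIXES : List String := ["fp16", "fp32", "bf16", "int8", "int4", "fp8"]

def BUILTIN_DTYPE_PREFIXES : List String := ["fp8", "int8", "int4"]

-- the 'for dtype_prefix in DTYPE_PREFIXES' loop of A
def getDtypeLoop (op : String) : List String → String × String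
  | [] => ("unknown", op)
  | p :: rest =>
    if PySem.Str.startswith op (p ++ "_") then
      if p ∈ BUILTIN_DTYPE_PREFIXES then (p, op)
      else (p, PySem.Str.slice op (some (PySem.Str.len p + 1)) none)
    else getDtypeLoop op rest

def get_dtype_from_op (op : String) : String × String :=
  getDtypeLoop op DTYPE_PREFIXES

-- ===== PORT B =====
-- op.partition("_") with the one-char separator "_": head = chars before the first '_',
-- separator found ↔ '_' ∈ op, tail = chars after the first '_'  (exact for this separator)
def get_dtype_from_op_alt (op : String) : String × String :=
  let cs := op.toList
  let head := cs.takeWhile (fun c => c ≠ '_')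
  let tail := (cs.dropWhile (fun c => c ≠ '_')).drop 1
  if '_' ∈ cs ∧ String.ofList head ∈ DTYPE_PREFIXES then
    if String.ofList head ∈ BUILTIN_DTYPE_PREFIXES then (String.ofList head, op)
    else (String.ofList head, String.ofList tail)
  else ("unknown", op)

-- ===== PRECONDITION & SPEC =====
def Spec_get_dtype_from_op (op : String) (out : String × String) : Prop := out = get_dtype_from_op_alt op
instance (op : String) (out : String × String) : Decidable (Spec_get_dtype_from_op op out) := by unfold Spec_get_dtype_from_op; infer_instance

-- ===== CLAIM (what is proved, stated in full; the proofs are below) =====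
def Claim_equal_get_dtype_from_op : Prop := ∀ (op : String), Dom_get_dtype_from_op op → Spec_get_dtype_from_op op (get_dtype_from_op op)

-- ===== LEMMAS AND PROOFS =====

-- startswith (p ++ "_") characterised by the partition's head, for a '_'-free p
lemma startswith_underscore_iff (cs p : List Char) (hp : '_' ∉ p) :
    (p ++ ['_']) <+: cs ↔ ('_' ∈ cs ∧ cs.takeWhile (fun c => c ≠ '_') = p) := by
  constructor
  · rintro ⟨r, rfl⟩
    refine ⟨by simp, ?_⟩
    rw [List.append_assoc, List.takeWhile_append]
    simp only [List.cons_append]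
    have hall : ∀ c ∈ p, (fun c => decide (c ≠ '_')) c = true := by
      intro c hc; simp; rintro rfl; exact hp hc
    rw [List.takeWhile_eq_self_iff.mpr hall]
    simp
  · rintro ⟨hmem, hhead⟩
    have hsplit := List.takeWhile_append_dropWhile (p := fun c => decide (c ≠ '_')) (l := cs)
    have hdw : cs.dropWhile (fun c => decide (c ≠ '_')) ≠ [] := by
      intro hnil
      have hcs : cs = cs.takeWhile (fun c => decide (c ≠ '_')) := by
        conv_lhs => rw [← hsplit]
        rw [hnil, List.append_nil]
      rw [hcs, hhead] at hmem
      exact hp hmem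
    obtain ⟨d, r, hdr⟩ := List.exists_cons_of_ne_nil hdw
    have hd : d = '_' := by
      have h2 := List.head_dropWhile_not (p := fun c : Char => decide (c ≠ '_')) (l := cs)
        hdw
      simp only [hdr] at h2
      simpa using h2
    refine ⟨r, ?_⟩
    conv_rhs => rw [← hsplit]
    rw [hhead, hdr, hd]
    simp

-- the tail after the first '_' is the drop past the head
lemma tail_eq_drop (cs p : List Char) (hhead : cs.takeWhile (fun c => c ≠ '_') = p) :
    (cs.dropWhile (fun c => c ≠ '_')).drop 1 = cs.drop (p.length + 1) := by
  have hsplit := List.takeWhile_append_dropWhile (p := fun c => decide (c ≠ '_')) (l := cs)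
  conv_rhs => rw [← hsplit]
  rw [hhead]
  simp [List.drop_append]

-- startswith of (p ++ "_") as a check on the partition's head, when op has a '_'
lemma sw_eq_head (op p : String) (hp : '_' ∉ p.toList) (hu : '_' ∈ op.toList) :
    PySem.Str.startswith op (p ++ "_")
      = decide (op.toList.takeWhile (fun c => c ≠ '_') = p.toList) := by
  have hto : (p ++ "_").toList = p.toList ++ ['_'] := by simp
  by_cases h : op.toList.takeWhile (fun c => c ≠ '_') = p.toList
  · rw [decide_eq_true h, PySem.Str.startswith, hto]
    exact (PySem.Chars.startswith_iff _ _).mpr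
      ((startswith_underscore_iff op.toList p.toList hp).mpr ⟨hu, h⟩)
  · rw [decide_eq_false h, PySem.Str.startswith, hto, Bool.eq_false_iff]
    intro habs
    exact h ((startswith_underscore_iff op.toList p.toList hp).mp
      ((PySem.Chars.startswith_iff _ _).mp habs)).2

-- with no '_' in op, no startswith (p ++ "_") can fire
lemma sw_false (op p : String) (hu : '_' ∉ op.toList) :
    PySem.Str.startswith op (p ++ "_") = false := by
  rw [PySem.Str.startswith, Bool.eq_false_iff]
  intro habs
  have hpre := (PySem.Chars.startswith_iff _ _).mp habs
  have : '_' ∈ op.toList := hpre.mem (by simp)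
  exact hu this

-- the B-side branch value agrees with A's slice
lemma slice_eq_tail (op p : String)
    (hhead : op.toList.takeWhile (fun c => c ≠ '_') = p.toList) :
    PySem.Str.slice op (some (PySem.Str.len p + 1)) none
      = String.ofList ((op.toList.dropWhile (fun c => c ≠ '_')).drop 1) := by
  rw [tail_eq_drop op.toList p.toList hhead]
  rw [PySem.Str.slice, PySem.Chars.slice, PySem.Str.len]
  rw [PySem.List.slice_from op.toList (a := (p.toList.length : Int) + 1) (by positivity)]
  norm_num

theorem get_dtype_from_op_eq_alt (op : String) :
    get_dtype_from_op op = get_dtype_from_op_alt op := by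
  unfold get_dtype_from_op get_dtype_from_op_alt
  by_cases hu : '_' ∈ op.toList
  · simp only [DTYPE_PREFIXES, getDtypeLoop,
      sw_eq_head op "fp16" (by decide) hu, sw_eq_head op "fp32" (by decide) hu,
      sw_eq_head op "bf16" (by decide) hu, sw_eq_head op "int8" (by decide) hu,
      sw_eq_head op "int4" (by decide) hu, sw_eq_head op "fp8" (by decide) hu,
      decide_eq_true_eq]
    by_cases h1 : op.toList.takeWhile (fun c => c ≠ '_') = "fp16".toList
    · rw [if_pos h1, if_neg (by decide),
        if_pos ⟨hu, by rw [h1, String.ofList_toList]; decide⟩, h1, String.ofList_toList,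
        if_neg (by decide), slice_eq_tail op "fp16" h1]
    rw [if_neg h1]
    by_cases h2 : op.toList.takeWhile (fun c => c ≠ '_') = "fp32".toList
    · rw [if_pos h2, if_neg (by decide),
        if_pos ⟨hu, by rw [h2, String.ofList_toList]; decide⟩, h2, String.ofList_toList,
        if_neg (by decide), slice_eq_tail op "fp32" h2]
    rw [if_neg h2]
    by_cases h3 : op.toList.takeWhile (fun c => c ≠ '_') = "bf16".toList
    · rw [if_pos h3, if_neg (by decide),
        if_pos ⟨hu, by rw [h3, String.ofList_toList]; decide⟩, h3, String.ofList_toList,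
        if_neg (by decide), slice_eq_tail op "bf16" h3]
    rw [if_neg h3]
    by_cases h4 : op.toList.takeWhile (fun c => c ≠ '_') = "int8".toList
    · rw [if_pos h4, if_pos (by decide),
        if_pos ⟨hu, by rw [h4, String.ofList_toList]; decide⟩, h4, String.ofList_toList,
        if_pos (by decide)]
    rw [if_neg h4]
    by_cases h5 : op.toList.takeWhile (fun c => c ≠ '_') = "int4".toList
    · rw [if_pos h5, if_pos (by decide),
        if_pos ⟨hu, by rw [h5, String.ofList_toList]; decide⟩, h5, String.ofList_toList,
        if_pos (by decide)]
    rw [if_neg h5]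
    by_cases h6 : op.toList.takeWhile (fun c => c ≠ '_') = "fp8".toList
    · rw [if_pos h6, if_pos (by decide),
        if_pos ⟨hu, by rw [h6, String.ofList_toList]; decide⟩, h6, String.ofList_toList,
        if_pos (by decide)]
    rw [if_neg h6]
    -- head matches none of the prefixes: both sides give ("unknown", op)
    rw [if_neg ?_]
    rintro ⟨-, hm⟩
    simp only [List.mem_cons, List.not_mem_nil, or_false] at hm
    rcases hm with h | h | h | h | h | h
    · exact h1 (by have := congrArg String.toList h; rwa [String.toList_ofList] at this)
    · exact h2 (by have := congrArg String.toList h; rwa [String.toList_ofList] at this)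
    · exact h3 (by have := congrArg String.toList h; rwa [String.toList_ofList] at this)
    · exact h4 (by have := congrArg String.toList h; rwa [String.toList_ofList] at this)
    · exact h5 (by have := congrArg String.toList h; rwa [String.toList_ofList] at this)
    · exact h6 (by have := congrArg String.toList h; rwa [String.toList_ofList] at this)
  · simp only [DTYPE_PREFIXES, getDtypeLoop,
      sw_false op "fp16" hu, sw_false op "fp32" hu, sw_false op "bf16" hu,
      sw_false op "int8" hu, sw_false op "int4" hu, sw_false op "fp8" hu,
      Bool.false_eq_true, if_false]
    rw [if_neg (by rintro ⟨h, -⟩; exact hu h)]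

-- ===== VERDICT (by name: the statement is the Claim_ definition above) =====
theorem get_dtype_from_op_spec : Claim_equal_get_dtype_from_op := by
  intro op _
  unfold Spec_get_dtype_from_op
  exact get_dtype_from_op_eq_alt op
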